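-- pv_equiv track=rewrite | github.com/TopNik073/rng-404 | src/services/nist/tests/universal_test.py | _determine_block_size
-- ===== SOURCE A (Python) =====
-- def _determine_block_size(n: int) -> int:
--     """
--     Determine the appropriate block size (L) based on sequence length
--
--     Args:
--         n: Length of the sequence
--
--     Returns:
--         int: Appropriate block size L
--     """
--     L = 5  # Minimum block size
--     block_size_thresholds = [
--         (387840, 6),
--         (904960, 7),
--         (2068480, 8),
--         (4654080, 9),
--         (10342400, 10),
--         (22753280, 11),
--         (49643520, 12),
--         (107560960, 13),
--         (231669760, 14),
--         (496435200, 15),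
--         (1059061760, 16),
--     ]
--
--     for threshold, size in block_size_thresholds:
--         if n >= threshold:
--             L = size
--         else:
--             break
--
--     return L
-- ===== SOURCE B (Python) =====
-- _THRESHOLDS = [387840, 904960, 2068480, 4654080, 10342400, 22753280,
--                49643520, 107560960, 231669760, 496435200, 1059061760]
--
--
-- def _determine_block_size(n: int) -> int:
--     """Binary-search the ascending threshold table: L = 5 + number of thresholds n meets."""
--     lo, hi = 0, len(_THRESHOLDS)
--     while lo < hi:
--         mid = (lo + hi) // 2
--         if n >= _THRESHOLDS[mid]:
--             lo = mid + 1
--         else: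
--             hi = mid
--     return 5 + lo
-- ===== Notes on version B (the rewrite author's own statement) =====
-- stated objective: alternative
-- what changed: The linear set-on-match/break scan over (threshold, size) pairs is replaced by a hand-written binary search over the ascending threshold table, returning the minimum block size plus the count of thresholds met.
import Mathlib
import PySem

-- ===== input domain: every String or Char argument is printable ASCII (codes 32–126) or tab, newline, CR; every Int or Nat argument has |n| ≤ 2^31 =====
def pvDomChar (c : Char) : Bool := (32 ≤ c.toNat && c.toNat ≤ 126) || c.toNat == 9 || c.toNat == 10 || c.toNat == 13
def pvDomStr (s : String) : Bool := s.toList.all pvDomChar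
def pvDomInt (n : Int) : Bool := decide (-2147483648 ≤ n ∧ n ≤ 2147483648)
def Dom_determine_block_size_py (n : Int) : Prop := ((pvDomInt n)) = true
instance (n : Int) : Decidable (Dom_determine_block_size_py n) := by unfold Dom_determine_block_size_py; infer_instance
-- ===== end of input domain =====

-- B replaces A's linear set-on-match/break scan over (threshold, size) pairs with a
-- binary search over the ascending threshold table (alternative decomposition, same cost class).

-- ===== PORT A =====
def pvThresholdsA : List (Int × Int) :=
  [(387840, 6), (904960, 7), (2068480, 8), (4654080, 9), (10342400, 10), (22753280, 11),
   (49643520, 12), (107560960, 13), (231669760, 14), (496435200, 15), (1059061760, 16)]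

-- the for-loop with `break`: carry L, stop at the first threshold not met
def pvLoopA (n : Int) : List (Int × Int) → Int → Int
  | [], L => L
  | (threshold, size) :: rest, L =>
      if n ≥ threshold then pvLoopA n rest size else L

def determine_block_size_py (n : Int) : Int := pvLoopA n pvThresholdsA 5

-- ===== PORT B =====
def pvThresholdsB : List Int :=
  [387840, 904960, 2068480, 4654080, 10342400, 22753280,
   49643520, 107560960, 231669760, 496435200, 1059061760]

-- the while-loop of Source B's hand-written binary search
def pvBsearch (n : Int) (lo hi : Nat) : Nat :=
  if _h : lo < hi then
    let mid := (lo + hi) / 2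
    if n ≥ pvThresholdsB.getD mid 0 then pvBsearch n (mid + 1) hi
    else pvBsearch n lo mid
  else lo
termination_by hi - lo
decreasing_by all_goals omega

def determine_block_size_py_alt (n : Int) : Int := 5 + (pvBsearch n 0 pvThresholdsB.length : Int)

-- ===== PRECONDITION & SPEC =====
def Spec_determine_block_size_py (n : Int) (out : Int) : Prop := out = determine_block_size_py_alt n
instance (n : Int) (out : Int) : Decidable (Spec_determine_block_size_py n out) := by unfold Spec_determine_block_size_py; infer_instance

-- ===== CLAIM (what is proved, stated in full; the proofs are below) =====
def Claim_equal_determine_block_size_py : Prop := ∀ (n : Int), Dom_determine_block_size_py n → Spec_determine_block_size_py n (determine_block_size_py n)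

-- ===== LEMMAS AND PROOFS =====

-- ===== VERDICT (by name: the statement is the Claim_ definition above) =====
theorem determine_block_size_py_spec : Claim_equal_determine_block_size_py := by
  intro n _
  show determine_block_size_py n = determine_block_size_py_alt n
  by_cases h0 : (387840:Int) ≤ n
  case neg =>
    have f1 : ¬ ((904960:Int) ≤ n) := by omega
    have f2 : ¬ ((2068480:Int) ≤ n) := by omega
    have f5 : ¬ ((22753280:Int) ≤ n) := by omega
    simp [determine_block_size_py, determine_block_size_py_alt, pvLoopA, pvBsearch, pvThresholdsA, pvThresholdsB, h0, f1, f2, f5]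
  case pos =>
    by_cases h1 : (904960:Int) ≤ n
    case neg =>
      have f2 : ¬ ((2068480:Int) ≤ n) := by omega
      have f5 : ¬ ((22753280:Int) ≤ n) := by omega
      simp [determine_block_size_py, determine_block_size_py_alt, pvLoopA, pvBsearch, pvThresholdsA, pvThresholdsB, h0, h1, f2, f5]
    case pos =>
      by_cases h2 : (2068480:Int) ≤ n
      case neg =>
        have f5 : ¬ ((22753280:Int) ≤ n) := by omega
        simp [determine_block_size_py, determine_block_size_py_alt, pvLoopA, pvBsearch, pvThresholdsA, pvThresholdsB, h0, h1, h2, f5]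
      case pos =>
        by_cases h3 : (4654080:Int) ≤ n
        case neg =>
          have f4 : ¬ ((10342400:Int) ≤ n) := by omega
          have f5 : ¬ ((22753280:Int) ≤ n) := by omega
          simp [determine_block_size_py, determine_block_size_py_alt, pvLoopA, pvBsearch, pvThresholdsA, pvThresholdsB, h0, h1, h2, h3, f4, f5]
        case pos =>
          by_cases h4 : (10342400:Int) ≤ n
          case neg =>
            have f5 : ¬ ((22753280:Int) ≤ n) := by omega
            simp [determine_block_size_py, determine_block_size_py_alt, pvLoopA, pvBsearch, pvThresholdsA, pvThresholdsB, h0, h1, h2, h3, h4, f5]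
          case pos =>
            by_cases h5 : (22753280:Int) ≤ n
            case neg =>
              simp [determine_block_size_py, determine_block_size_py_alt, pvLoopA, pvBsearch, pvThresholdsA, pvThresholdsB, h0, h1, h2, h3, h4, h5]
            case pos =>
              by_cases h6 : (49643520:Int) ≤ n
              case neg =>
                have f7 : ¬ ((107560960:Int) ≤ n) := by omega
                have f8 : ¬ ((231669760:Int) ≤ n) := by omega
                simp [determine_block_size_py, determine_block_size_py_alt, pvLoopA, pvBsearch, pvThresholdsA, pvThresholdsB, h0, h1, h2, h3, h4, h5, h6, f7, f8]
              case pos =>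
                by_cases h7 : (107560960:Int) ≤ n
                case neg =>
                  have f8 : ¬ ((231669760:Int) ≤ n) := by omega
                  simp [determine_block_size_py, determine_block_size_py_alt, pvLoopA, pvBsearch, pvThresholdsA, pvThresholdsB, h0, h1, h2, h3, h4, h5, h6, h7, f8]
                case pos =>
                  by_cases h8 : (231669760:Int) ≤ n
                  case neg =>
                    simp [determine_block_size_py, determine_block_size_py_alt, pvLoopA, pvBsearch, pvThresholdsA, pvThresholdsB, h0, h1, h2, h3, h4, h5, h6, h7, h8]
                  case pos =>
                    by_cases h9 : (496435200:Int) ≤ n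
                    case neg =>
                      have f10 : ¬ ((1059061760:Int) ≤ n) := by omega
                      simp [determine_block_size_py, determine_block_size_py_alt, pvLoopA, pvBsearch, pvThresholdsA, pvThresholdsB, h0, h1, h2, h3, h4, h5, h6, h7, h8, h9, f10]
                    case pos =>
                      by_cases h10 : (1059061760:Int) ≤ n
                      case neg =>
                        simp [determine_block_size_py, determine_block_size_py_alt, pvLoopA, pvBsearch, pvThresholdsA, pvThresholdsB, h0, h1, h2, h3, h4, h5, h6, h7, h8, h9, h10]
                      case pos =>
                        simp [determine_block_size_py, determine_block_size_py_alt, pvLoopA, pvBsearch, pvThresholdsA, pvThresholdsB, h0, h1, h2, h3, h4, h5, h6, h7, h8, h9, h10]
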